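-- pv_equiv track=rewrite | github.com/kreadou/village | Utilitaire.py | compterOccurencePosition
-- ===== SOURCE A (Python) =====
-- def compterOccurencePosition(t=None):
--     if t:
--         x=[]
--         for i in t:
--             if 1 < t.count(i):
--                 x.append((i, t.index(i), t.count(i)))
--         x=list(set(x))
--         x.sort()
--         return x
--     else:return []
-- ===== SOURCE B (Python) =====
-- def compterOccurencePosition(t=None):
--     if not t:
--         return []
--     pairs = sorted(enumerate(t), key=lambda p: p[1])
--     res = []
--     while pairs:
--         p = pairs[0]
--         k = 1
--         while k < len(pairs) and pairs[k][1] == p[1]: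
--             k += 1
--         if k > 1:
--             res.append((p[1], min(i for i, _ in pairs[:k]), k))
--         pairs = pairs[k:]
--     res.sort()
--     return res
-- ===== Notes on version B (the rewrite author's own statement) =====
-- stated objective: faster
-- what changed: A rescans the whole list with t.count and t.index for every element and dedups via set(); B sorts the enumerated (index, value) pairs by value once and walks them in a single pass, grouping consecutive equal values into runs whose length is the count and whose minimum index is the first position.
import Mathlib
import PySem

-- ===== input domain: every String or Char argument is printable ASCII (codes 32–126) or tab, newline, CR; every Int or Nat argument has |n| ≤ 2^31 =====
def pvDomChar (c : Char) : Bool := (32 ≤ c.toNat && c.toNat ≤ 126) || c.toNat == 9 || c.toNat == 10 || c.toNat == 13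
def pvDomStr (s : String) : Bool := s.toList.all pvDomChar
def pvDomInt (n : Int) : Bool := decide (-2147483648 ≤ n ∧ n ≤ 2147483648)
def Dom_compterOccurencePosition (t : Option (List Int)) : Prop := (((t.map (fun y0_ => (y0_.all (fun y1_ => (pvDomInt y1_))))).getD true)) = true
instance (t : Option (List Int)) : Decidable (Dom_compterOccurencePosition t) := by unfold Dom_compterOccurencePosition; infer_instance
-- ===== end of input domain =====

-- B sorts the enumerated pairs by value and scans once, grouping consecutive equal values into runs, instead of A's per-element count/index rescans plus set-dedup (objective: faster).

-- ===== PORT A =====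
-- x.append((i, t.index(i), t.count(i))) ; list(set(x)) ; x.sort()
def compterOccurencePosition (t : Option (List Int)) : List (List Int) :=
  match t with
  | some l =>
    if l ≠ [] then
      let x : List (List Int) := l.foldl (fun acc i =>
        if 1 < PySem.List.count l i then
          acc ++ [[i, (((PySem.List.index? l i).getD 0 : Nat) : Int), ((PySem.List.count l i : Nat) : Int)]]
        else acc) []
      PySem.List.sorted (PySem.Set.ofList x) (fun y => y) false
    else []
  | none => []

-- ===== PORT B =====
-- the 'while pairs:' run-grouping loop of Source B: pairs[0], the inner 'while pairs[k][1] == p[1]' scan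
-- (= takeWhile on the tail), min over pairs[:k], then continue on pairs[k:] (= dropWhile)
def groupRuns (pairs : List (Int × Int)) : List (List Int) :=
  match pairs with
  | [] => []
  | p :: rest =>
    let run := p :: rest.takeWhile (fun q => q.2 == p.2)
    let rest' := rest.dropWhile (fun q => q.2 == p.2)
    (if 1 < run.length then
      [[p.2, (PySem.List.min? (run.map (·.1)) (fun x => x)).getD 0, (run.length : Int)]]
     else []) ++ groupRuns rest'
termination_by pairs.length
decreasing_by
  simp only [List.length_cons]
  exact Nat.lt_succ_of_le (List.length_dropWhile_le _ _)

def compterOccurencePosition_alt (t : Option (List Int)) : List (List Int) :=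
  match t with
  | none => []
  | some l =>
    if l = [] then []
    else
      let pairs := PySem.List.sorted (PySem.List.enumerate l) (fun p => p.2) false
      PySem.List.sorted (groupRuns pairs) (fun y => y) false

-- ===== PRECONDITION & SPEC =====
def Spec_compterOccurencePosition (t : Option (List Int)) (out : List (List Int)) : Prop := out = compterOccurencePosition_alt t
instance (t : Option (List Int)) (out : List (List Int)) : Decidable (Spec_compterOccurencePosition t out) := by unfold Spec_compterOccurencePosition; infer_instance

-- ===== CLAIM (what is proved, stated in full; the proofs are below) =====
def Claim_equal_compterOccurencePosition : Prop := ∀ (t : Option (List Int)), Dom_compterOccurencePosition t → Spec_compterOccurencePosition t (compterOccurencePosition t)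

-- ===== LEMMAS AND PROOFS =====

def pvCnt (s : List (Int × Int)) (v : Int) : Nat := (s.filter (fun q => q.2 == v)).length
def pvMin (s : List (Int × Int)) (v : Int) : Int :=
  (PySem.List.min? ((s.filter (fun q => q.2 == v)).map (·.1)) (fun x => x)).getD 0

theorem run_decomp (w : Int) (rest : List (Int × Int))
    (hp : rest.Pairwise (fun a b => a.2 ≤ b.2)) (hge : ∀ q ∈ rest, w ≤ q.2) :
    rest.takeWhile (fun q => q.2 == w) = rest.filter (fun q => q.2 == w)
    ∧ rest.dropWhile (fun q => q.2 == w) = rest.filter (fun q => !(q.2 == w))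
    ∧ ∀ q ∈ rest.dropWhile (fun q => q.2 == w), w < q.2 := by
  induction rest with
  | nil => simp
  | cons a rs ih =>
    rcases List.pairwise_cons.mp hp with ⟨ha, hrs⟩
    by_cases h : a.2 = w
    · obtain ⟨h1, h2, h3⟩ := ih hrs (fun q hq => hge q (List.mem_cons_of_mem a hq))
      refine ⟨?_, ?_, ?_⟩
      · simp [h, h1]
      · simp [h, h2]
      · intro q hq
        rw [List.dropWhile_cons_of_pos (by simp [h])] at hq
        exact h3 q hq
    · have hwa : w < a.2 := lt_of_le_of_ne (hge a (List.mem_cons_self)) (fun e => h e.symm)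
      have hnone : ∀ q ∈ rs, w < q.2 := fun q hq => lt_of_lt_of_le hwa (ha q hq)
      refine ⟨?_, ?_, ?_⟩
      · rw [List.takeWhile_cons_of_neg (by simp [h]), List.filter_cons_of_neg (by simp [h]),
          List.filter_eq_nil_iff.mpr (fun q hq => by simp [(hnone q hq).ne'])]
      · rw [List.dropWhile_cons_of_neg (by simp [h]), List.filter_cons_of_pos (by simp [h]),
          List.filter_eq_self.mpr (fun q hq => by simp [(hnone q hq).ne'])]
      · intro q hq
        rw [List.dropWhile_cons_of_neg (by simp [h])] at hq
        rcases List.mem_cons.mp hq with rfl | hq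
        · exact hwa
        · exact hnone q hq

theorem groupRuns_cons (p : Int × Int) (rest : List (Int × Int)) :
    groupRuns (p :: rest) =
      (if 1 < (p :: rest.takeWhile (fun q => q.2 == p.2)).length then
        [[p.2, (PySem.List.min? ((p :: rest.takeWhile (fun q => q.2 == p.2)).map (·.1)) (fun x => x)).getD 0,
          ((p :: rest.takeWhile (fun q => q.2 == p.2)).length : Int)]] else [])
      ++ groupRuns (rest.dropWhile (fun q => q.2 == p.2)) := by
  rw [groupRuns]

theorem groupRuns_mem (s : List (Int × Int)) (hs : s.Pairwise (fun a b => a.2 ≤ b.2)) (y : List Int) :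
    y ∈ groupRuns s ↔ ∃ v, v ∈ s.map (·.2) ∧ 1 < pvCnt s v ∧ y = [v, pvMin s v, (pvCnt s v : Int)] := by
  match s with
  | [] => simp [groupRuns]
  | p :: rest =>
    rcases List.pairwise_cons.mp hs with ⟨hge, hrs⟩
    obtain ⟨ht, hd, hgt⟩ := run_decomp p.2 rest hrs hge
    have hs' : (rest.filter (fun q => !(q.2 == p.2))).Pairwise (fun a b => a.2 ≤ b.2) :=
      hrs.sublist List.filter_sublist
    have hgt' : ∀ q ∈ rest.filter (fun q => !(q.2 == p.2)), p.2 < q.2 := hd ▸ hgt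
    have ih := groupRuns_mem (rest.filter (fun q => !(q.2 == p.2))) hs'
    have hcntw : pvCnt (p :: rest) p.2 = (p :: rest.filter (fun q => q.2 == p.2)).length := by
      simp [pvCnt]
    have hminw : pvMin (p :: rest) p.2 =
        (PySem.List.min? ((p :: rest.filter (fun q => q.2 == p.2)).map (·.1)) (fun x => x)).getD 0 := by
      simp [pvMin]
    have hfilt : ∀ v, v ≠ p.2 → (p :: rest).filter (fun q => q.2 == v) =
        (rest.filter (fun q => !(q.2 == p.2))).filter (fun q => q.2 == v) := by
      intro v hv
      rw [List.filter_cons_of_neg (by simp; exact fun e => hv e.symm), List.filter_filter]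
      apply List.filter_congr
      intro a _
      by_cases hav : a.2 = v
      · simp [hav, hv]
      · simp [hav]
    have hcnt : ∀ v, v ≠ p.2 → pvCnt (p :: rest) v = pvCnt (rest.filter (fun q => !(q.2 == p.2))) v := by
      intro v hv; unfold pvCnt; rw [hfilt v hv]
    have hmin : ∀ v, v ≠ p.2 → pvMin (p :: rest) v = pvMin (rest.filter (fun q => !(q.2 == p.2))) v := by
      intro v hv; unfold pvMin; rw [hfilt v hv]
    have hmemne : ∀ v, v ∈ (rest.filter (fun q => !(q.2 == p.2))).map (·.2) → v ≠ p.2 := by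
      intro v hv
      obtain ⟨q, hq, rfl⟩ := List.mem_map.mp hv
      exact (hgt' q hq).ne'
    have hmemv : ∀ v, v ∈ (p :: rest).map (·.2) ↔
        v = p.2 ∨ v ∈ (rest.filter (fun q => !(q.2 == p.2))).map (·.2) := by
      intro v
      simp only [List.map_cons, List.mem_cons, List.mem_map]
      constructor
      · rintro (rfl | ⟨q, hq, rfl⟩)
        · exact Or.inl rfl
        · by_cases hv : q.2 = p.2
          · exact Or.inl hv
          · exact Or.inr ⟨q, List.mem_filter.mpr ⟨hq, by simp [hv]⟩, rfl⟩
      · rintro (rfl | ⟨q, hq, rfl⟩)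
        · exact Or.inl rfl
        · exact Or.inr ⟨q, (List.mem_filter.mp hq).1, rfl⟩
    rw [groupRuns_cons, ht, hd]
    by_cases hclen : 1 < (p :: rest.filter (fun q => q.2 == p.2)).length
    · rw [if_pos hclen]
      simp only [List.mem_append, List.mem_singleton, ih]
      constructor
      · rintro (rfl | ⟨v, hvm, hvc, rfl⟩)
        · exact ⟨p.2, (hmemv p.2).mpr (Or.inl rfl), by rw [hcntw]; exact hclen, by rw [hcntw, hminw]⟩
        · have hv := hmemne v hvm
          exact ⟨v, (hmemv v).mpr (Or.inr hvm), by rw [hcnt v hv]; exact hvc,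
            by rw [hcnt v hv, hmin v hv]⟩
      · rintro ⟨v, hvm, hvc, rfl⟩
        rcases (hmemv v).mp hvm with rfl | hvm'
        · exact Or.inl (by rw [hcntw, hminw])
        · have hv := hmemne v hvm'
          exact Or.inr ⟨v, hvm', by rw [← hcnt v hv]; exact hvc, by rw [hcnt v hv, hmin v hv]⟩
    · rw [if_neg hclen]
      simp only [List.nil_append, ih]
      constructor
      · rintro ⟨v, hvm, hvc, rfl⟩
        have hv := hmemne v hvm
        exact ⟨v, (hmemv v).mpr (Or.inr hvm), by rw [hcnt v hv]; exact hvc,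
          by rw [hcnt v hv, hmin v hv]⟩
      · rintro ⟨v, hvm, hvc, rfl⟩
        rcases (hmemv v).mp hvm with rfl | hvm'
        · exact absurd (hcntw ▸ hvc) hclen
        · have hv := hmemne v hvm'
          exact ⟨v, hvm', by rw [← hcnt v hv]; exact hvc, by rw [hcnt v hv, hmin v hv]⟩
termination_by s.length
decreasing_by
  simp only [List.length_cons]
  exact Nat.lt_succ_of_le (List.length_filter_le _ _)

theorem groupRuns_nodup (s : List (Int × Int)) (hs : s.Pairwise (fun a b => a.2 ≤ b.2)) :
    (groupRuns s).Nodup := by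
  match s with
  | [] => simp [groupRuns]
  | p :: rest =>
    rcases List.pairwise_cons.mp hs with ⟨hge, hrs⟩
    obtain ⟨ht, hd, hgt⟩ := run_decomp p.2 rest hrs hge
    have hs' : (rest.filter (fun q => !(q.2 == p.2))).Pairwise (fun a b => a.2 ≤ b.2) :=
      hrs.sublist List.filter_sublist
    have hgt' : ∀ q ∈ rest.filter (fun q => !(q.2 == p.2)), p.2 < q.2 := hd ▸ hgt
    have ih := groupRuns_nodup (rest.filter (fun q => !(q.2 == p.2))) hs'
    have hnotin : ∀ (m c : Int), [p.2, m, c] ∉ groupRuns (rest.filter (fun q => !(q.2 == p.2))) := by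
      intro m c hmem
      obtain ⟨v, hvm, _, heq⟩ := (groupRuns_mem _ hs' _).mp hmem
      obtain ⟨q, hq, rfl⟩ := List.mem_map.mp hvm
      have := hgt' q hq
      have : q.2 = p.2 := by injection heq with h1 _; exact h1.symm
      omega
    rw [groupRuns_cons, hd]
    by_cases hclen : 1 < (p :: rest.takeWhile (fun q => q.2 == p.2)).length
    · rw [if_pos hclen]
      exact List.Nodup.cons (hnotin _ _) ih
    · rw [if_neg hclen]
      simpa using ih
termination_by s.length
decreasing_by
  simp only [List.length_cons]
  exact Nat.lt_succ_of_le (List.length_filter_le _ _)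

theorem min_getD_eq (xs : List Int) (a : Int) (ha : a ∈ xs) (hlb : ∀ y ∈ xs, a ≤ y) :
    (PySem.List.min? xs (fun x => x)).getD 0 = a := by
  cases hm : PySem.List.min? xs (fun x => x) with
  | none => rw [PySem.List.min?_eq_none_iff] at hm; subst hm; simp at ha
  | some m =>
    have h1 : m ∈ xs := PySem.List.min?_mem hm
    have h2 : m ≤ a := PySem.List.min?_isMin hm a ha
    simp [le_antisymm h2 (hlb m h1)]

theorem pvCnt_sorted_eq (l : List Int) (v : Int) (s : List (Int × Int))
    (hp : s.Perm (PySem.List.enumerate l)) : pvCnt s v = l.count v := by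
  unfold pvCnt
  rw [← List.countP_eq_length_filter, hp.countP_eq]
  have h1 : List.countP (fun q => q.2 == v) (PySem.List.enumerate l)
      = List.countP (· == v) ((PySem.List.enumerate l).map (·.2)) := by
    rw [List.countP_map]; rfl
  rw [h1, PySem.List.map_snd_enumerate, List.count]

theorem pvMin_sorted_eq (l : List Int) (v : Int) (hv : v ∈ l) (s : List (Int × Int))
    (hp : s.Perm (PySem.List.enumerate l)) :
    pvMin s v = (((PySem.List.index? l v).getD 0 : Nat) : Int) := by
  obtain ⟨k, hks⟩ := Option.isSome_iff_exists.mp ((PySem.List.index?_isSome_iff l v).mpr hv)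
  obtain ⟨hklt, hlk, hmin⟩ := PySem.List.getElem_of_index?_eq_some hks
  rw [hks]
  unfold pvMin
  apply min_getD_eq
  · apply List.mem_map.mpr
    refine ⟨((k : Int), v), List.mem_filter.mpr ⟨?_, by simp⟩, rfl⟩
    rw [hp.mem_iff, PySem.List.mem_enumerate_iff]
    exact ⟨k, hklt, by simp [hlk]⟩
  · intro y hy
    obtain ⟨q, hq, rfl⟩ := List.mem_map.mp hy
    obtain ⟨hqs, hqv⟩ := List.mem_filter.mp hq
    rw [hp.mem_iff, PySem.List.mem_enumerate_iff] at hqs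
    obtain ⟨j, hj, rfl⟩ := hqs
    simp only [beq_iff_eq] at hqv
    have hkj : k ≤ j := by
      by_contra hlt
      exact hmin j (by omega) hqv
    simp
    omega

theorem main_eq (l : List Int) (hl : l ≠ []) :
    compterOccurencePosition (some l) = compterOccurencePosition_alt (some l) := by
  simp only [compterOccurencePosition, compterOccurencePosition_alt, hl, ne_eq,
    not_false_eq_true, if_pos, if_neg]
  have hA := PySem.List.foldl_append_if (fun i => decide (1 < PySem.List.count l i))
      (fun i => [i, (((PySem.List.index? l i).getD 0 : Nat) : Int), ((PySem.List.count l i : Nat) : Int)]) l []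
  simp only [decide_eq_true_eq] at hA
  rw [hA]
  have hs : (PySem.List.sorted (PySem.List.enumerate l) (fun p => p.2) false).Pairwise
      (fun a b => a.2 ≤ b.2) := PySem.List.sorted_pairwise _ _
  have hp : (PySem.List.sorted (PySem.List.enumerate l) (fun p => p.2) false).Perm
      (PySem.List.enumerate l) := PySem.List.sorted_perm _ _ _
  set s := PySem.List.sorted (PySem.List.enumerate l) (fun p => p.2) false with hsdef
  have hinst : (fun (a b : List Int) => a.decidableLT b) = (List.instLinearOrder : LinearOrder (List Int)).toDecidableLT := by
    funext a b; exact Subsingleton.elim _ _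
  rw [hinst]
  apply PySem.List.sorted_eq_sorted_of_perm _ _ _ (fun a b h => h)
  rw [List.perm_ext_iff_of_nodup (PySem.Set.nodup_ofList _) (groupRuns_nodup s hs)]
  intro y
  rw [groupRuns_mem s hs y, PySem.Set.mem_ofList]
  simp only [List.nil_append]
  have hmem : ∀ v : Int, v ∈ s.map (fun q => q.2) ↔ v ∈ l := by
    intro v
    rw [List.Perm.mem_iff (hp.map (fun q => q.2)), PySem.List.map_snd_enumerate]
  constructor
  · intro hy
    obtain ⟨v, hvf, rfl⟩ := List.mem_map.mp hy
    obtain ⟨hvl, hvc'⟩ := List.mem_filter.mp hvf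
    have hvc : 1 < PySem.List.count l v := of_decide_eq_true hvc'
    rw [PySem.List.count_eq] at hvc
    refine ⟨v, (hmem v).mpr hvl, ?_, ?_⟩
    · rw [pvCnt_sorted_eq l v s hp]; exact hvc
    · rw [pvCnt_sorted_eq l v s hp, pvMin_sorted_eq l v hvl s hp, PySem.List.count_eq]
  · rintro ⟨v, hvm, hvc, rfl⟩
    have hvl : v ∈ l := (hmem v).mp hvm
    rw [pvCnt_sorted_eq l v s hp] at hvc
    refine List.mem_map.mpr ⟨v, List.mem_filter.mpr ⟨hvl, decide_eq_true (by rw [PySem.List.count_eq]; exact hvc)⟩, ?_⟩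
    rw [pvCnt_sorted_eq l v s hp, pvMin_sorted_eq l v hvl s hp, PySem.List.count_eq]

-- ===== VERDICT (by name: the statement is the Claim_ definition above) =====
theorem compterOccurencePosition_spec : Claim_equal_compterOccurencePosition := by
  intro t _
  unfold Spec_compterOccurencePosition
  cases t with
  | none => rfl
  | some l =>
    by_cases hl : l = []
    · subst hl; rfl
    · exact main_eq l hl
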